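-- pv_equiv track=rewrite | github.com/finwarman/advent-of-code-2024 | 21/solution.py | keypad_seq
-- ===== SOURCE A (Python) =====
-- def shortest_keypad_path(start, end, gap, valid_positions):
--     if start == end:
--         return ''
--
--     x, y = start
--     gx, gy = end
--
--     dx = 1 if gx - x > 0 else (-1 if gx - x < 0 else 0)
--     dy = 1 if gy - y > 0 else (-1 if gy - y < 0 else 0)
--
--     seq = ''
--
--     horizontal_first = True
--     if (y == gap[1] and dy < 0) or (x == gap[0] and dx < 0):
--         horizontal_first = False
--
--     if horizontal_first:
--         while (x, y) != (gx, gy):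
--             if x != gx:
--                 x += dx
--                 seq += ('>' if dx > 0 else '<')
--             elif y != gy:
--                 y += dy
--                 seq += ('v' if dy > 0 else '^')
--     else:
--         while (x, y) != (gx, gy):
--             if y != gy:
--                 y += dy
--                 seq += ('v' if dy > 0 else '^')
--             elif x != gx:
--                 x += dx
--                 seq += ('>' if dx > 0 else '<')
--     return seq
--
-- def keypad_seq(start, code, pos_map, gap, valid_positions):
--     final_seq = ''
--     current_position = start
--     for c in code:
--         end_position = pos_map[c]
--         moves = shortest_keypad_path(current_position, end_position, gap, valid_positions)
--         final_seq += moves + 'A'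
--         current_position = end_position
--     return final_seq
-- ===== SOURCE B (Python) =====
-- def _path(start, end, gap):
--     if start == end:
--         return ''
--     x, y = start
--     gx, gy = end
--     dx = 1 if gx - x > 0 else (-1 if gx - x < 0 else 0)
--     dy = 1 if gy - y > 0 else (-1 if gy - y < 0 else 0)
--     horizontal_first = not ((y == gap[1] and dy < 0) or (x == gap[0] and dx < 0))
--     hstr = ('>' if dx > 0 else '<') * abs(gx - x)
--     vstr = ('v' if dy > 0 else '^') * abs(gy - y)
--     return hstr + vstr if horizontal_first else vstr + hstr
--
-- def keypad_seq(start, code, pos_map, gap, valid_positions):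
--     parts = []
--     cur = start
--     for c in code:
--         end = pos_map[c]
--         parts.append(_path(cur, end, gap) + 'A')
--         cur = end
--     return ''.join(parts)
-- ===== Notes on version B (the rewrite author's own statement) =====
-- stated objective: simpler
-- what changed: Each leg's move string is built in closed form (sign, abs-distance, repeated-character strings joined at the end) instead of simulating the walk step by step in two while loops with character-by-character string appends.
import Mathlib
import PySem

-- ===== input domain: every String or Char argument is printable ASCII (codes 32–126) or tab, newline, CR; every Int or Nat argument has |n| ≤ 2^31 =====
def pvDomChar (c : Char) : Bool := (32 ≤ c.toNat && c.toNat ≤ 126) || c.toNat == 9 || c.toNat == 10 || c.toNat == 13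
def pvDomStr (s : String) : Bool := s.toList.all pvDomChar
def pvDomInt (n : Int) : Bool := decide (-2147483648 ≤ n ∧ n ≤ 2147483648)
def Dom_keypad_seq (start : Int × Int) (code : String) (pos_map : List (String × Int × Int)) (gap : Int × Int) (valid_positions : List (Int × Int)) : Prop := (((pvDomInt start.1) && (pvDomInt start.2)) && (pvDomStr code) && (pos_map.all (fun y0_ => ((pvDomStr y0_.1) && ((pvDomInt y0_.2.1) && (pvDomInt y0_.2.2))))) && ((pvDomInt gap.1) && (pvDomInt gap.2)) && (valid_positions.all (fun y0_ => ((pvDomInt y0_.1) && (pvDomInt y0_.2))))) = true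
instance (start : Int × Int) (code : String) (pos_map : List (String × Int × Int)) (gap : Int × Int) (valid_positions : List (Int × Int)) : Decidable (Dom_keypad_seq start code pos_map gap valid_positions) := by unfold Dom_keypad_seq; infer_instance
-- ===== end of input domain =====

-- B replaces A's step-by-step while-loop simulation with closed-form replicated move strings (faster per key press when distances are large).


-- ===== PORT A =====
-- A's while loops, fuel = total Manhattan distance (exactly the number of Python iterations)
def pvLoopH (fuel : Nat) (x y gx gy dx dy : Int) (seq : List Char) : List Char :=
  match fuel with
  | 0 => seq
  | f + 1 =>
    if ¬ (x = gx ∧ y = gy) then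
      if x ≠ gx then pvLoopH f (x + dx) y gx gy dx dy (seq ++ [if dx > 0 then '>' else '<'])
      else if y ≠ gy then pvLoopH f x (y + dy) gx gy dx dy (seq ++ [if dy > 0 then 'v' else '^'])
      else seq
    else seq

def pvLoopV (fuel : Nat) (x y gx gy dx dy : Int) (seq : List Char) : List Char :=
  match fuel with
  | 0 => seq
  | f + 1 =>
    if ¬ (x = gx ∧ y = gy) then
      if y ≠ gy then pvLoopV f x (y + dy) gx gy dx dy (seq ++ [if dy > 0 then 'v' else '^'])
      else if x ≠ gx then pvLoopV f (x + dx) y gx gy dx dy (seq ++ [if dx > 0 then '>' else '<'])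
      else seq
    else seq

-- shortest_keypad_path; the string is built as a List Char, converted at the boundary
def pvPathA (start e gap : Int × Int) : List Char :=
  if start = e then []
  else
    let x := start.1; let y := start.2
    let gx := e.1; let gy := e.2
    let dx : Int := if gx - x > 0 then 1 else if gx - x < 0 then -1 else 0
    let dy : Int := if gy - y > 0 then 1 else if gy - y < 0 then -1 else 0
    let horizontal_first : Bool := ¬ ((y = gap.2 ∧ dy < 0) ∨ (x = gap.1 ∧ dx < 0))
    if horizontal_first then pvLoopH ((gx - x).natAbs + (gy - y).natAbs) x y gx gy dx dy []
    else pvLoopV ((gx - x).natAbs + (gy - y).natAbs) x y gx gy dx dy []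

-- the for-loop of keypad_seq; none = KeyError (pos_map[c] missing)
def pvKSLoopA (pos_map : List (String × Int × Int)) (gap : Int × Int) (cs : List Char) (cur : Int × Int) (acc : List Char) : Option (List Char) :=
  match cs with
  | [] => some acc
  | c :: rest =>
    match PySem.Dict.get? (PySem.Dict.mk pos_map) (String.ofList [c]) with
    | none => none
    | some e => pvKSLoopA pos_map gap rest e (acc ++ pvPathA cur e gap ++ ['A'])

def keypad_seq (start : Int × Int) (code : String) (pos_map : List (String × Int × Int)) (gap : Int × Int) (valid_positions : List (Int × Int)) : String :=
  String.ofList ((pvKSLoopA pos_map gap code.toList start []).getD [])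

-- ===== PORT B =====
-- B builds each leg's move string in closed form: replicated '<'/'>' then 'v'/'^' (or vertical first)
def pvPathB (start e gap : Int × Int) : List Char :=
  if start = e then []
  else
    let x := start.1; let y := start.2
    let gx := e.1; let gy := e.2
    let dx : Int := if gx - x > 0 then 1 else if gx - x < 0 then -1 else 0
    let dy : Int := if gy - y > 0 then 1 else if gy - y < 0 then -1 else 0
    let horizontal_first : Bool := ¬ ((y = gap.2 ∧ dy < 0) ∨ (x = gap.1 ∧ dx < 0))
    let hstr := List.replicate (gx - x).natAbs (if dx > 0 then '>' else '<')
    let vstr := List.replicate (gy - y).natAbs (if dy > 0 then 'v' else '^')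
    if horizontal_first then hstr ++ vstr else vstr ++ hstr

-- B's for-loop collecting parts (none = KeyError); the join happens at the end
def pvKSLoopB (pos_map : List (String × Int × Int)) (gap : Int × Int) (cs : List Char) (cur : Int × Int) : Option (List (List Char)) :=
  match cs with
  | [] => some []
  | c :: rest =>
    match PySem.Dict.get? (PySem.Dict.mk pos_map) (String.ofList [c]) with
    | none => none
    | some e => (pvKSLoopB pos_map gap rest e).map (fun ps => (pvPathB cur e gap ++ ['A']) :: ps)

def keypad_seq_alt (start : Int × Int) (code : String) (pos_map : List (String × Int × Int)) (gap : Int × Int) (valid_positions : List (Int × Int)) : String :=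
  String.ofList (((pvKSLoopB pos_map gap code.toList start).map (fun ps => ps.flatten)).getD [])

-- ===== PRECONDITION & SPEC =====
-- Pre_ excludes exactly the inputs on which Python's pos_map[c] raises KeyError (a character of code with no entry in pos_map).
def Pre_keypad_seq (start : Int × Int) (code : String) (pos_map : List (String × Int × Int)) (gap : Int × Int) (valid_positions : List (Int × Int)) : Prop :=
  (code.toList.all (fun c => (PySem.Dict.get? (PySem.Dict.mk pos_map) (String.ofList [c])).isSome)) = true
instance (start : Int × Int) (code : String) (pos_map : List (String × Int × Int)) (gap : Int × Int) (valid_positions : List (Int × Int)) : Decidable (Pre_keypad_seq start code pos_map gap valid_positions) := by unfold Pre_keypad_seq; infer_instance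

def pvWitness_keypad_seq : (Int × Int) × String × (List (String × Int × Int)) × (Int × Int) × (List (Int × Int)) :=
  ((0, 0), "A", [("A", (1, 0))], (0, 1), [(1, 0)])

def Spec_keypad_seq (start : Int × Int) (code : String) (pos_map : List (String × Int × Int)) (gap : Int × Int) (valid_positions : List (Int × Int)) (out : String) : Prop := out = keypad_seq_alt start code pos_map gap valid_positions
instance (start : Int × Int) (code : String) (pos_map : List (String × Int × Int)) (gap : Int × Int) (valid_positions : List (Int × Int)) (out : String) : Decidable (Spec_keypad_seq start code pos_map gap valid_positions out) := by unfold Spec_keypad_seq; infer_instance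

-- ===== CLAIM (what is proved, stated in full; the proofs are below) =====
def Claim_equal_keypad_seq : Prop := ∀ (start : Int × Int) (code : String) (pos_map : List (String × Int × Int)) (gap : Int × Int) (valid_positions : List (Int × Int)), Dom_keypad_seq start code pos_map gap valid_positions → Pre_keypad_seq start code pos_map gap valid_positions → Spec_keypad_seq start code pos_map gap valid_positions (keypad_seq start code pos_map gap valid_positions)

-- ===== LEMMAS AND PROOFS =====

theorem pvLoopH_eq (gx gy dx dy : Int)
    (f : Nat) : ∀ (x y : Int) (seq : List Char),
    f = (gx - x).natAbs + (gy - y).natAbs →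
    (x = gx ∨ (gx - x > 0 ∧ dx = 1) ∨ (gx - x < 0 ∧ dx = -1)) →
    (y = gy ∨ (gy - y > 0 ∧ dy = 1) ∨ (gy - y < 0 ∧ dy = -1)) →
    pvLoopH f x y gx gy dx dy seq =
      seq ++ List.replicate (gx - x).natAbs (if dx > 0 then '>' else '<')
          ++ List.replicate (gy - y).natAbs (if dy > 0 then 'v' else '^') := by
  induction f with
  | zero =>
    intro x y seq hf hx hy
    have h1 : gx = x ∧ gy = y := by omega
    simp [pvLoopH, h1.1, h1.2]
  | succ f ih =>
    intro x y seq hf hx hy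
    have hne : ¬ (x = gx ∧ y = gy) := by rintro ⟨rfl, rfl⟩; omega
    by_cases hxe : x = gx
    · have hy' : ¬ y = gy := by rintro rfl; exact hne ⟨hxe, rfl⟩
      have hf' : f = (gx - x).natAbs + (gy - (y + dy)).natAbs := by omega
      have hy2 : (y + dy = gy ∨ (gy - (y + dy) > 0 ∧ dy = 1) ∨ (gy - (y + dy) < 0 ∧ dy = -1)) := by omega
      have hrec := ih x (y + dy) (seq ++ [if dy > 0 then 'v' else '^']) hf' hx hy2
      have hrep : (gy - y).natAbs = (gy - (y + dy)).natAbs + 1 := by omega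
      subst hxe
      simp [pvLoopH, hy', hrec, hrep, List.replicate_succ]
    · have hf' : f = (gx - (x + dx)).natAbs + (gy - y).natAbs := by omega
      have hx2 : (x + dx = gx ∨ (gx - (x + dx) > 0 ∧ dx = 1) ∨ (gx - (x + dx) < 0 ∧ dx = -1)) := by omega
      have hrec := ih (x + dx) y (seq ++ [if dx > 0 then '>' else '<']) hf' hx2 hy
      have hrep : (gx - x).natAbs = (gx - (x + dx)).natAbs + 1 := by omega
      simp [pvLoopH, hxe, hrec, hrep, List.replicate_succ]

theorem pvLoopV_eq (gx gy dx dy : Int)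
    (f : Nat) : ∀ (x y : Int) (seq : List Char),
    f = (gx - x).natAbs + (gy - y).natAbs →
    (x = gx ∨ (gx - x > 0 ∧ dx = 1) ∨ (gx - x < 0 ∧ dx = -1)) →
    (y = gy ∨ (gy - y > 0 ∧ dy = 1) ∨ (gy - y < 0 ∧ dy = -1)) →
    pvLoopV f x y gx gy dx dy seq =
      seq ++ List.replicate (gy - y).natAbs (if dy > 0 then 'v' else '^')
          ++ List.replicate (gx - x).natAbs (if dx > 0 then '>' else '<') := by
  induction f with
  | zero =>
    intro x y seq hf hx hy
    have h1 : gx = x ∧ gy = y := by omega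
    simp [pvLoopV, h1.1, h1.2]
  | succ f ih =>
    intro x y seq hf hx hy
    have hne : ¬ (x = gx ∧ y = gy) := by rintro ⟨rfl, rfl⟩; omega
    by_cases hye : y = gy
    · have hx' : ¬ x = gx := by rintro rfl; exact hne ⟨rfl, hye⟩
      have hf' : f = (gx - (x + dx)).natAbs + (gy - y).natAbs := by omega
      have hx2 : (x + dx = gx ∨ (gx - (x + dx) > 0 ∧ dx = 1) ∨ (gx - (x + dx) < 0 ∧ dx = -1)) := by omega
      have hrec := ih (x + dx) y (seq ++ [if dx > 0 then '>' else '<']) hf' hx2 hy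
      have hrep : (gx - x).natAbs = (gx - (x + dx)).natAbs + 1 := by omega
      subst hye
      simp [pvLoopV, hx', hrec, hrep, List.replicate_succ]
    · have hf' : f = (gx - x).natAbs + (gy - (y + dy)).natAbs := by omega
      have hy2 : (y + dy = gy ∨ (gy - (y + dy) > 0 ∧ dy = 1) ∨ (gy - (y + dy) < 0 ∧ dy = -1)) := by omega
      have hrec := ih x (y + dy) (seq ++ [if dy > 0 then 'v' else '^']) hf' hx hy2
      have hrep : (gy - y).natAbs = (gy - (y + dy)).natAbs + 1 := by omega
      simp [pvLoopV, hye, hrec, hrep, List.replicate_succ]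

theorem pvPath_eq (start e gap : Int × Int) : pvPathA start e gap = pvPathB start e gap := by
  obtain ⟨x, y⟩ := start
  obtain ⟨gx, gy⟩ := e
  by_cases h : (x, y) = (gx, gy)
  · simp [pvPathA, pvPathB, h]
  · have hx : (x = gx ∨ (gx - x > 0 ∧ (if gx - x > 0 then (1:Int) else if gx - x < 0 then -1 else 0) = 1) ∨
        (gx - x < 0 ∧ (if gx - x > 0 then (1:Int) else if gx - x < 0 then -1 else 0) = -1)) := by
      split_ifs <;> omega
    have hy : (y = gy ∨ (gy - y > 0 ∧ (if gy - y > 0 then (1:Int) else if gy - y < 0 then -1 else 0) = 1) ∨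
        (gy - y < 0 ∧ (if gy - y > 0 then (1:Int) else if gy - y < 0 then -1 else 0) = -1)) := by
      split_ifs <;> omega
    simp only [pvPathA, pvPathB, h, if_false]
    by_cases hhf : (¬ ((y = gap.2 ∧ (if gy - y > 0 then (1:Int) else if gy - y < 0 then -1 else 0) < 0) ∨
        (x = gap.1 ∧ (if gx - x > 0 then (1:Int) else if gx - x < 0 then -1 else 0) < 0)) : Prop)
    · simp only [hhf, decide_true]
      rw [pvLoopH_eq _ _ _ _ _ x y [] rfl hx hy]
      simp
    · simp only [hhf, decide_false]
      rw [pvLoopV_eq _ _ _ _ _ x y [] rfl hx hy]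
      simp

theorem pvKSLoop_eq (pos_map : List (String × Int × Int)) (gap : Int × Int)
    (cs : List Char) : ∀ (cur : Int × Int) (acc : List Char),
    pvKSLoopA pos_map gap cs cur acc
      = (pvKSLoopB pos_map gap cs cur).map (fun ps => acc ++ ps.flatten) := by
  induction cs with
  | nil => intro cur acc; simp [pvKSLoopA, pvKSLoopB]
  | cons c rest ih =>
    intro cur acc
    simp only [pvKSLoopA, pvKSLoopB]
    cases PySem.Dict.get? (PySem.Dict.mk pos_map) (String.ofList [c]) with
    | none => simp
    | some e =>
      simp only
      rw [ih e (acc ++ pvPathA cur e gap ++ ['A'])]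
      cases pvKSLoopB pos_map gap rest e with
      | none => simp
      | some ps => simp [pvPath_eq, List.append_assoc]

-- ===== VERDICT (by name: the statement is the Claim_ definition above) =====
theorem keypad_seq_spec : Claim_equal_keypad_seq := by
  intro start code pos_map gap valid_positions _ _
  unfold Spec_keypad_seq keypad_seq keypad_seq_alt
  rw [pvKSLoop_eq]
  cases pvKSLoopB pos_map gap code.toList start with
  | none => rfl
  | some ps => simp
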